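-- pv_equiv track=rewrite | github.com/coderameen/DSA-Workshops | searching/9_two_pointer_approach.py | sumPair2
-- ===== SOURCE A (Python) =====
-- def sumPair2(arr,x):
--     s = 0
--     e = len(arr) - 1
--     while s<e:
--         if arr[s] + arr[e] == x:
--             return True
--         elif arr[s] + arr[e] < x:
--             s = s + 1
--         else:
--             e = e - 1
--     return False
-- ===== SOURCE B (Python) =====
-- def sumPair2(arr, x):
--     seen = set()
--     for v in arr:
--         if x - v in seen:
--             return True
--         seen.add(v)
--     return False
-- ===== Notes on version B (the rewrite author's own statement) =====
-- stated objective: idiomatic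
-- what changed: Replaces the converging two-pointer scan over the sorted array with a single forward pass that keeps a hash set of seen values and tests the complement before inserting.
-- outside the precondition, e.g. on sumPair2([3, 1, 2], 3): A returns False, B returns True
import Mathlib
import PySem

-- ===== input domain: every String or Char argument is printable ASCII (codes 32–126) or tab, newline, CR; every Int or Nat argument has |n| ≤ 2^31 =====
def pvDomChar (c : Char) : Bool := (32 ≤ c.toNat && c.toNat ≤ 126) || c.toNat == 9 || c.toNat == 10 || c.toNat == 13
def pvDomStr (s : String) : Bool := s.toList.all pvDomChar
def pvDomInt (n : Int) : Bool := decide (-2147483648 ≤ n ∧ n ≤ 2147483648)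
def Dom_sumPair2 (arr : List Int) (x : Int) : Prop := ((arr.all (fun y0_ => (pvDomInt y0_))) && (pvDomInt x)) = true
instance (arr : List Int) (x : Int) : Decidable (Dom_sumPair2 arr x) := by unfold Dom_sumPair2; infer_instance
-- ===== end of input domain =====

-- B replaces the converging two-pointer scan with a single forward pass over a hash set of
-- previously seen values (complement tested before inserting); same O(n) cost, more idiomatic.

-- ===== PORT A =====
-- while s < e converging two-pointer loop of A; indices are Python ints, reads are in range
-- whenever taken (0 ≤ s < e ≤ len-1), so the total pyGetD matches Python's arr[s]/arr[e] exactly.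
def sumPair2Loop (arr : List Int) (x : Int) (s e : Int) : Bool :=
  if h : s < e then
    if PySem.List.pyGetD arr s 0 + PySem.List.pyGetD arr e 0 = x then true
    else if PySem.List.pyGetD arr s 0 + PySem.List.pyGetD arr e 0 < x then
      sumPair2Loop arr x (s + 1) e
    else
      sumPair2Loop arr x s (e - 1)
  else false
termination_by (e - s).toNat
decreasing_by all_goals omega

def sumPair2 (arr : List Int) (x : Int) : Bool :=
  sumPair2Loop arr x 0 (arr.length - 1)

-- ===== PORT B =====
-- for v in arr: if x - v in seen: return True; seen.add(v)
def sumPair2AltLoop (x : Int) (rest : List Int) (seen : PySem.Set Int) : Bool :=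
  match rest with
  | [] => false
  | v :: r => if (x - v) ∈ seen then true else sumPair2AltLoop x r (PySem.Set.add seen v)

def sumPair2_alt (arr : List Int) (x : Int) : Bool :=
  sumPair2AltLoop x arr PySem.Set.empty

-- ===== PRECONDITION & SPEC =====
-- Pre_ admits every non-decreasing (sorted) array — the two-pointer technique's stated domain —
-- and additionally any array none of whose pairs sums to x (both programs return False there);
-- it excludes only unsorted arrays containing a pair that sums to x, where A's returned value is
-- an artefact of the accidental scan order (e.g. A([3,1,2],3) = False although 1+2 = 3).
def Pre_sumPair2 (arr : List Int) (x : Int) : Prop :=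
  List.Pairwise (· ≤ ·) arr ∨ List.Pairwise (fun a b => a + b ≠ x) arr
instance (arr : List Int) (x : Int) : Decidable (Pre_sumPair2 arr x) := by
  unfold Pre_sumPair2; infer_instance

def pvWitness_sumPair2 : List Int × Int := ([1, 2, 2, 5], 7)

def Spec_sumPair2 (arr : List Int) (x : Int) (out : Bool) : Prop := out = sumPair2_alt arr x
instance (arr : List Int) (x : Int) (out : Bool) : Decidable (Spec_sumPair2 arr x out) := by
  unfold Spec_sumPair2; infer_instance

-- ===== CLAIM (what is proved, stated in full; the proofs are below) =====
def Claim_equal_sumPair2 : Prop := ∀ (arr : List Int) (x : Int), Dom_sumPair2 arr x → Pre_sumPair2 arr x → Spec_sumPair2 arr x (sumPair2 arr x)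

-- ===== LEMMAS AND PROOFS =====

-- "some pair of positions i < j inside [s,e] sums to x" — common characterisation of both loops
def hasPairIn (arr : List Int) (x : Int) (s e : Int) : Prop :=
  ∃ i j : Int, s ≤ i ∧ i < j ∧ j ≤ e ∧
    PySem.List.pyGetD arr i 0 + PySem.List.pyGetD arr j 0 = x

theorem sorted_pyGetD_mono {arr : List Int} (hs : List.Pairwise (· ≤ ·) arr)
    {i j : Int} (h0 : 0 ≤ i) (hij : i ≤ j) (hj : j < arr.length) :
    PySem.List.pyGetD arr i 0 ≤ PySem.List.pyGetD arr j 0 := by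
  rcases eq_or_lt_of_le hij with rfl | hlt
  · exact le_refl _
  · rw [PySem.List.pyGetD_eq_getElem arr 0 h0 (by omega),
        PySem.List.pyGetD_eq_getElem arr 0 (by omega) hj]
    exact List.pairwise_iff_getElem.mp hs i.toNat j.toNat (by omega) (by omega) (by omega)

theorem loopA_iff {arr : List Int} {x : Int} (hs : List.Pairwise (· ≤ ·) arr) :
    ∀ (n : Nat) (s e : Int), (e - s).toNat = n → 0 ≤ s → e < arr.length →
      (sumPair2Loop arr x s e = true ↔ hasPairIn arr x s e) := by
  intro n
  induction n using Nat.strong_induction_on with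
  | _ n ih =>
    intro s e hn hs0 he
    rw [sumPair2Loop]
    by_cases hse : s < e
    · simp only [hse, dif_pos]
      by_cases heq : PySem.List.pyGetD arr s 0 + PySem.List.pyGetD arr e 0 = x
      · simp only [heq, if_pos]
        constructor
        · intro _; exact ⟨s, e, le_refl s, hse, le_refl e, heq⟩
        · intro _; trivial
      · simp only [heq, if_false]
        by_cases hlt : PySem.List.pyGetD arr s 0 + PySem.List.pyGetD arr e 0 < x
        · simp only [hlt, if_pos]
          rw [ih (e - (s + 1)).toNat (by omega) (s + 1) e rfl (by omega) he]
          constructor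
          · rintro ⟨i, j, h1, h2, h3, h4⟩; exact ⟨i, j, by omega, h2, h3, h4⟩
          · rintro ⟨i, j, h1, h2, h3, h4⟩
            refine ⟨i, j, ?_, h2, h3, h4⟩
            by_contra hc
            have hi : i = s := by omega
            subst hi
            have : PySem.List.pyGetD arr j 0 ≤ PySem.List.pyGetD arr e 0 :=
              sorted_pyGetD_mono hs (by omega) h3 he
            omega
        · simp only [hlt, if_false]
          rw [ih (e - 1 - s).toNat (by omega) s (e - 1) rfl hs0 (by omega)]
          constructor
          · rintro ⟨i, j, h1, h2, h3, h4⟩; exact ⟨i, j, h1, h2, by omega, h4⟩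
          · rintro ⟨i, j, h1, h2, h3, h4⟩
            refine ⟨i, j, h1, h2, ?_, h4⟩
            by_contra hc
            have hj : j = e := by omega
            subst hj
            have : PySem.List.pyGetD arr s 0 ≤ PySem.List.pyGetD arr i 0 :=
              sorted_pyGetD_mono hs hs0 h1 (by omega)
            omega
    · simp only [hse]
      constructor
      · intro h; cases h
      · rintro ⟨i, j, h1, h2, h3, _⟩; omega

theorem loopB_iff (x : Int) :
    ∀ (rest : List Int) (seen : PySem.Set Int),
      (sumPair2AltLoop x rest seen = true ↔
        ∃ (j : Nat) (hj : j < rest.length), (x - rest[j]) ∈ seen ++ rest.take j) := by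
  intro rest
  induction rest with
  | nil => intro seen; simp [sumPair2AltLoop]
  | cons v r ih =>
    intro seen
    rw [sumPair2AltLoop]
    by_cases hm : (x - v) ∈ seen
    · simp only [hm, if_pos, true_iff]
      exact ⟨0, by simp, by simpa using hm⟩
    · simp only [hm, if_false]
      rw [ih (PySem.Set.add seen v)]
      constructor
      · rintro ⟨j, hj, hmem⟩
        refine ⟨j + 1, by simpa using Nat.succ_lt_succ hj, ?_⟩
        simp only [List.getElem_cons_succ, List.take_succ_cons]
        simp only [List.mem_append, PySem.Set.mem_add, List.mem_cons] at hmem ⊢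
        tauto
      · rintro ⟨j, hj, hmem⟩
        cases j with
        | zero =>
          simp only [List.getElem_cons_zero, List.take_zero, List.append_nil] at hmem
          exact absurd hmem hm
        | succ j =>
          refine ⟨j, by simpa using Nat.lt_of_succ_lt_succ hj, ?_⟩
          simp only [List.getElem_cons_succ, List.take_succ_cons] at hmem
          simp only [List.mem_append, PySem.Set.mem_add, List.mem_cons] at hmem ⊢
          tauto

theorem altB_iff (arr : List Int) (x : Int) :
    sumPair2_alt arr x = true ↔
      ∃ (j : Nat) (hj : j < arr.length), (x - arr[j]) ∈ arr.take j := by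
  unfold sumPair2_alt
  rw [loopB_iff]
  constructor
  · rintro ⟨j, hj, hmem⟩
    exact ⟨j, hj, by simpa [PySem.Set.empty] using hmem⟩
  · rintro ⟨j, hj, hmem⟩
    exact ⟨j, hj, by simpa [PySem.Set.empty] using hmem⟩

theorem bridge (arr : List Int) (x : Int) :
    (∃ (j : Nat) (hj : j < arr.length), (x - arr[j]) ∈ arr.take j) ↔
      hasPairIn arr x 0 (arr.length - 1) := by
  constructor
  · rintro ⟨j, hj, hmem⟩
    rcases List.mem_take_iff_getElem.mp hmem with ⟨i, hi, hval⟩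
    refine ⟨(i : Int), (j : Int), by omega, by omega, by omega, ?_⟩
    rw [PySem.List.pyGetD_eq_getElem arr 0 (by omega) (by simp; omega),
        PySem.List.pyGetD_eq_getElem arr 0 (by omega) (by simp; omega)]
    simp only [Int.toNat_natCast]
    omega
  · rintro ⟨i, j, h0, hij, hje, hsum⟩
    have hjlen : j < arr.length := by omega
    rw [PySem.List.pyGetD_eq_getElem arr 0 (by omega) (by omega),
        PySem.List.pyGetD_eq_getElem arr 0 (by omega) (by omega)] at hsum
    refine ⟨j.toNat, by omega, ?_⟩
    have hval : arr[i.toNat] = x - arr[j.toNat] := by omega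
    rw [← hval]
    exact List.mem_take_iff_getElem.mpr ⟨i.toNat, by omega, rfl⟩

-- A's loop claims a pair only when it has actually seen one: no sortedness needed.
theorem loopA_true_pair {arr : List Int} {x : Int} :
    ∀ (n : Nat) (s e : Int), (e - s).toNat = n →
      sumPair2Loop arr x s e = true → hasPairIn arr x s e := by
  intro n
  induction n using Nat.strong_induction_on with
  | _ n ih =>
    intro s e hn h
    rw [sumPair2Loop] at h
    by_cases hse : s < e
    · simp only [hse, dif_pos] at h
      by_cases heq : PySem.List.pyGetD arr s 0 + PySem.List.pyGetD arr e 0 = x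
      · exact ⟨s, e, le_refl s, hse, le_refl e, heq⟩
      · simp only [heq, if_false] at h
        by_cases hlt : PySem.List.pyGetD arr s 0 + PySem.List.pyGetD arr e 0 < x
        · simp only [hlt, if_pos] at h
          rcases ih (e - (s + 1)).toNat (by omega) (s + 1) e rfl h with ⟨i, j, h1, h2, h3, h4⟩
          exact ⟨i, j, by omega, h2, h3, h4⟩
        · simp only [hlt, if_false] at h
          rcases ih (e - 1 - s).toNat (by omega) s (e - 1) rfl h with ⟨i, j, h1, h2, h3, h4⟩
          exact ⟨i, j, h1, h2, by omega, h4⟩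
    · simp only [hse] at h; cases h

theorem noPair_not_hasPairIn {arr : List Int} {x : Int}
    (hnp : List.Pairwise (fun a b => a + b ≠ x) arr) :
    ¬ hasPairIn arr x 0 (arr.length - 1) := by
  rintro ⟨i, j, h0, hij, hje, hsum⟩
  rw [PySem.List.pyGetD_eq_getElem arr 0 (by omega) (by omega),
      PySem.List.pyGetD_eq_getElem arr 0 (by omega) (by omega)] at hsum
  exact List.pairwise_iff_getElem.mp hnp i.toNat j.toNat (by omega) (by omega) (by omega) hsum

-- ===== VERDICT (by name: the statement is the Claim_ definition above) =====
theorem sumPair2_spec : Claim_equal_sumPair2 := by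
  intro arr x _dom hpre
  unfold Spec_sumPair2
  rw [Bool.eq_iff_iff]
  unfold sumPair2
  rcases hpre with hsorted | hnopair
  · rw [loopA_iff hsorted ((arr.length : Int) - 1 - 0).toNat 0 ((arr.length : Int) - 1) rfl
          (by omega) (by omega),
        altB_iff, bridge]
  · constructor
    · intro h
      exact absurd (loopA_true_pair ((arr.length : Int) - 1 - 0).toNat 0 ((arr.length : Int) - 1)
        rfl h) (noPair_not_hasPairIn hnopair)
    · intro h
      exact absurd ((bridge arr x).mp ((altB_iff arr x).mp h)) (noPair_not_hasPairIn hnopair)
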